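-- pv_equiv track=rewrite | github.com/miray-mustafov/LeetCode | 01.ArrayString/27.1662. Check If Two String Arrays are Equivalent.py | f
-- ===== SOURCE A (Python) =====
-- def f(word1, word2):
--     idx1 = idx2 = 0
--     i1 = i2 = 0
--     while idx1 < len(word1) and idx2 < len(word2):
--         w1, w2 = word1[idx1], word2[idx2]
--
--         while i1 < len(w1) and i2 < len(w2):
--             if w1[i1] != w2[i2]:
--                 return False
--             i1, i2 = i1 + 1, i2 + 1
--
--         if not i1 < len(w1):
--             i1, idx1 = 0, idx1 + 1
--         if not i2 < len(w2):
--             i2, idx2 = 0, idx2 + 1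
--
--     # if i1 != 0 or i2 != 0:  # the edge case, means one is longer
--     if idx1 < len(word1) or idx2 < len(word2):
--         return False
--     return True
-- ===== SOURCE B (Python) =====
-- def f(word1, word2):
--     return "".join(word1) == "".join(word2)
-- ===== Notes on version B (the rewrite author's own statement) =====
-- stated objective: idiomatic
-- what changed: Replaces the nested two-pointer per-character streaming comparison with a build-then-compare: join each array into one string and compare the strings.
-- intended difference: When the two concatenations are equal but the arrays end with different numbers of trailing empty strings (e.g. ['a'] vs ['a','']), A returns False because its loop stops once one index list is exhausted, while B returns True, which is the intended answer for 'are the string arrays equivalent'. — e.g. on f(["a"], ["a", ""]): A returns false, B returns true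
import Mathlib
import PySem

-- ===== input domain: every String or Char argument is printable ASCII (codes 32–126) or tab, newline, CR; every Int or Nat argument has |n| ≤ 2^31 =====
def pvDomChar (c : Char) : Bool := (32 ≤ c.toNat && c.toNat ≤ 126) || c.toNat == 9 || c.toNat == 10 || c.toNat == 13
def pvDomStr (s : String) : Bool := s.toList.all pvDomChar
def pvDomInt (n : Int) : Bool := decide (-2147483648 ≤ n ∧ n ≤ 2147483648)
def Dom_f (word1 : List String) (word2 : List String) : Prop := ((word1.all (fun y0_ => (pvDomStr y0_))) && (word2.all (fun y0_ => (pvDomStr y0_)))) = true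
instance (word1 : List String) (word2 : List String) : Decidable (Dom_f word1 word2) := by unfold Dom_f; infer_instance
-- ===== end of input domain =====

-- B replaces A's nested two-pointer character streaming with join-then-compare; on arrays whose
-- concatenations are equal but whose trailing-empty-string counts differ, A wrongly returns False
-- and B returns the intended True (stated below as D_f).

-- ===== PORT A =====
-- inner `while i1 < len(w1) and i2 < len(w2)` loop of A: returns none on `return False`
-- (character mismatch), otherwise the final (i1, i2). Strings are handled as their char lists (exact).
def innerA (w1 w2 : List Char) (i1 i2 : Nat) : Option (Nat × Nat) :=
  if h : i1 < w1.length ∧ i2 < w2.length then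
    if w1[i1]'h.1 ≠ w2[i2]'h.2 then none
    else innerA w1 w2 (i1 + 1) (i2 + 1)
  else some (i1, i2)
termination_by w1.length - i1
decreasing_by omega

-- outer `while idx1 < len(word1) and idx2 < len(word2)` loop of A, state (idx1, i1, idx2, i2);
-- the two `if not i < len(w)` resets are the branches below.
def outerA (ws1 ws2 : List (List Char)) (idx1 i1 idx2 i2 : Nat) : Bool :=
  if hw : idx1 < ws1.length ∧ idx2 < ws2.length then
    match innerA (ws1[idx1]'hw.1) (ws2[idx2]'hw.2) i1 i2 with
    | none => false
    | some (j1, j2) =>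
      if h1 : ¬ j1 < (ws1[idx1]'hw.1).length then
        if h2 : ¬ j2 < (ws2[idx2]'hw.2).length then
          outerA ws1 ws2 (idx1 + 1) 0 (idx2 + 1) 0
        else
          outerA ws1 ws2 (idx1 + 1) 0 idx2 j2
      else
        if h2 : ¬ j2 < (ws2[idx2]'hw.2).length then
          outerA ws1 ws2 idx1 j1 (idx2 + 1) 0
        else
          false  -- unreachable: innerA only exits with j1 or j2 at its word's end (Python loops forever here)
  else
    -- `if idx1 < len(word1) or idx2 < len(word2): return False; return True`
    !(idx1 < ws1.length || idx2 < ws2.length)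
termination_by (ws1.length - idx1) + (ws2.length - idx2)
decreasing_by all_goals omega

def f (word1 : List String) (word2 : List String) : Bool :=
  outerA (word1.map String.toList) (word2.map String.toList) 0 0 0 0

-- ===== PORT B =====
-- B: return "".join(word1) == "".join(word2)
def f_alt (word1 : List String) (word2 : List String) : Bool :=
  PySem.Str.join "" word1 == PySem.Str.join "" word2

-- ===== PRECONDITION & SPEC =====
-- number of trailing empty words (used only to state D_f)
def te (l : List (List Char)) : Nat :=
  match l with
  | [] => 0
  | w :: l => if w = [] ∧ te l = l.length then te l + 1 else te l

-- When the two concatenations are equal but the arrays end with different numbers of trailing empty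
-- strings (e.g. ["a"] vs ["a",""]), A returns False because its loop stops once one index list is
-- exhausted, while B returns True, the intended answer for "are the string arrays equivalent".
def D_f (word1 : List String) (word2 : List String) : Prop :=
  (word1.map String.toList).flatten = (word2.map String.toList).flatten ∧
    te (word1.map String.toList) ≠ te (word2.map String.toList)
instance (word1 : List String) (word2 : List String) : Decidable (D_f word1 word2) := by
  unfold D_f; infer_instance

def Spec_f (word1 : List String) (word2 : List String) (out : Bool) : Prop :=
  ¬ D_f word1 word2 → out = f_alt word1 word2
instance (word1 : List String) (word2 : List String) (out : Bool) : Decidable (Spec_f word1 word2 out) := by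
  unfold Spec_f; infer_instance

def pvDiffWitness_f : List String × List String := (["a"], ["a", ""])
def pvDiffWitnessOut_f : Bool × Bool := (false, true)

-- ===== CLAIM (what is proved, stated in full; the proofs are below) =====
def Claim_unchanged_f : Prop := ∀ (word1 : List String) (word2 : List String), Dom_f word1 word2 → Spec_f word1 word2 (f word1 word2)
def Claim_changed_f : Prop := Dom_f (pvDiffWitness_f.1) (pvDiffWitness_f.2) ∧ D_f (pvDiffWitness_f.1) (pvDiffWitness_f.2) ∧ f (pvDiffWitness_f.1) (pvDiffWitness_f.2) = pvDiffWitnessOut_f.1 ∧ f_alt (pvDiffWitness_f.1) (pvDiffWitness_f.2) = pvDiffWitnessOut_f.2 ∧ pvDiffWitnessOut_f.1 ≠ pvDiffWitnessOut_f.2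
def Claim_exact_f : Prop := ∀ (word1 : List String) (word2 : List String), Dom_f word1 word2 → D_f word1 word2 → f word1 word2 ≠ f_alt word1 word2

-- ===== LEMMAS AND PROOFS =====

-- remaining words of one side, given (idx, i)
def rem (ws : List (List Char)) (idx i : Nat) : List (List Char) :=
  match ws.drop idx with
  | [] => []
  | w :: rest => w.drop i :: rest

theorem rem_of_ge {ws : List (List Char)} {idx : Nat} (i : Nat) (h : ws.length ≤ idx) :
    rem ws idx i = [] := by
  unfold rem
  rw [List.drop_eq_nil_iff.mpr h]

theorem rem_of_lt {ws : List (List Char)} {idx : Nat} (i : Nat) (h : idx < ws.length) :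
    rem ws idx i = (ws[idx]'h).drop i :: ws.drop (idx + 1) := by
  unfold rem
  rw [List.drop_eq_getElem_cons h]

theorem rem_zero (ws : List (List Char)) : rem ws 0 0 = ws := by
  cases ws <;> simp [rem]

theorem te_le (l : List (List Char)) : te l ≤ l.length := by
  induction l with
  | nil => simp [te]
  | cons w l ih => rw [te]; split <;> simp <;> omega

theorem te_eq_length_iff {l : List (List Char)} : te l = l.length ↔ l.flatten = [] := by
  induction l with
  | nil => simp [te]
  | cons w l ih =>
    rw [te]
    have hle := te_le l
    constructor
    · intro h
      split at h
      · rename_i hc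
        simp [hc.1, ih.mp hc.2]
      · simp at h; omega
    · intro h
      simp only [List.flatten_cons, List.append_eq_nil_iff] at h
      simp [h.1, ih.mpr h.2, List.length_cons]

-- innerA on a mismatch: the two remaining character streams can never be equal
theorem innerA_none {w1 w2 : List Char} {i1 i2 : Nat}
    (h : innerA w1 w2 i1 i2 = none) :
    ∀ x y : List Char, w1.drop i1 ++ x ≠ w2.drop i2 ++ y := by
  fun_induction innerA with
  | case1 i1 i2 hlt hne =>
    intro x y hxy
    rw [List.drop_eq_getElem_cons hlt.1, List.drop_eq_getElem_cons hlt.2] at hxy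
    simp only [List.cons_append, List.cons.injEq] at hxy
    exact hne hxy.1
  | case2 i1 i2 hlt hne ih =>
    intro x y hxy
    rw [List.drop_eq_getElem_cons hlt.1, List.drop_eq_getElem_cons hlt.2] at hxy
    simp only [List.cons_append, List.cons.injEq] at hxy
    exact ih h x y hxy.2
  | case3 i1 i2 hlt => simp at h

-- innerA on a clean exit: the exit indices are at (or before) the ends, at least one at its end,
-- and stream equality is preserved
theorem innerA_some {w1 w2 : List Char} {i1 i2 j1 j2 : Nat}
    (h : innerA w1 w2 i1 i2 = some (j1, j2)) :
    i1 ≤ j1 ∧ i2 ≤ j2 ∧ ¬(j1 < w1.length ∧ j2 < w2.length) ∧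
      ∀ x y : List Char, (w1.drop i1 ++ x = w2.drop i2 ++ y ↔ w1.drop j1 ++ x = w2.drop j2 ++ y) := by
  fun_induction innerA with
  | case1 i1 i2 hlt hne => simp at h
  | case2 i1 i2 hlt hne ih =>
    obtain ⟨ha, hb, hc, hiff⟩ := ih h
    refine ⟨by omega, by omega, hc, ?_⟩
    simp only [ne_eq, not_not] at hne
    intro x y
    refine Iff.trans ?_ (hiff x y)
    rw [List.drop_eq_getElem_cons hlt.1, List.drop_eq_getElem_cons hlt.2, hne]
    simp only [List.cons_append, List.cons.injEq, true_and]
  | case3 i1 i2 hlt =>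
    simp only [Option.some.injEq, Prod.mk.injEq] at h
    obtain ⟨h1, h2⟩ := h
    subst h1; subst h2
    exact ⟨le_refl _, le_refl _, hlt, fun x y => Iff.rfl⟩

theorem te_cons (w : List Char) (l : List (List Char)) :
    te (w :: l) = if w = [] ∧ te l = l.length then te l + 1 else te l := by
  rw [te]

theorem rem_zero_drop (ws : List (List Char)) (idx : Nat) : rem ws idx 0 = ws.drop idx := by
  unfold rem
  cases h : ws.drop idx <;> simp

theorem pair_cons_cons (c : List Char) (A1 A2 : List (List Char)) :
    ((c ++ A1.flatten = c ++ A2.flatten) ∧ te (c :: A1) = te (c :: A2)) ↔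
      (A1.flatten = A2.flatten ∧ te A1 = te A2) := by
  have hA : (c ++ A1.flatten = c ++ A2.flatten) ↔ A1.flatten = A2.flatten :=
    ⟨List.append_cancel_left, fun h => by rw [h]⟩
  rw [hA, te_cons, te_cons]
  constructor
  · rintro ⟨hf, ht⟩
    have hlen : (te A1 = A1.length) ↔ (te A2 = A2.length) := by
      rw [te_eq_length_iff, te_eq_length_iff, hf]
    refine ⟨hf, ?_⟩
    split_ifs at ht with h1 h2 h2 <;> try omega
    · exact absurd ⟨h1.1, hlen.mp h1.2⟩ h2
    · exact absurd ⟨h2.1, hlen.mpr h2.2⟩ h1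
  · rintro ⟨hf, ht⟩
    have hlen : (te A1 = A1.length) ↔ (te A2 = A2.length) := by
      rw [te_eq_length_iff, te_eq_length_iff, hf]
    refine ⟨hf, ?_⟩
    split_ifs with h1 h2 h2 <;> try omega
    · exact absurd ⟨h1.1, hlen.mp h1.2⟩ h2
    · exact absurd ⟨h2.1, hlen.mpr h2.2⟩ h1

theorem pair_step1 (c d : List Char) (hd : d ≠ []) (A1 A2 : List (List Char)) :
    ((c ++ A1.flatten = (c ++ d) ++ A2.flatten) ∧ te (c :: A1) = te ((c ++ d) :: A2)) ↔
      ((A1.flatten = d ++ A2.flatten) ∧ te A1 = te (d :: A2)) := by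
  have hA : (c ++ A1.flatten = (c ++ d) ++ A2.flatten) ↔ A1.flatten = d ++ A2.flatten := by
    rw [List.append_assoc]
    exact ⟨List.append_cancel_left, fun h => by rw [h]⟩
  have hcd : c ++ d ≠ [] := by simp [hd]
  rw [hA, te_cons (c ++ d), te_cons d, if_neg (by simp [hcd]), if_neg (by simp [hd]), te_cons c]
  constructor
  · rintro ⟨hf, ht⟩
    refine ⟨hf, ?_⟩
    split_ifs at ht with h1
    · have : A1.flatten ≠ [] := by rw [hf]; simp [hd]
      exact absurd (te_eq_length_iff.mp h1.2) this
    · exact ht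
  · rintro ⟨hf, ht⟩
    refine ⟨hf, ?_⟩
    split_ifs with h1
    · have : A1.flatten ≠ [] := by rw [hf]; simp [hd]
      exact absurd (te_eq_length_iff.mp h1.2) this
    · exact ht

theorem pair_step2 (c d : List Char) (hd : d ≠ []) (A1 A2 : List (List Char)) :
    (((c ++ d) ++ A1.flatten = c ++ A2.flatten) ∧ te ((c ++ d) :: A1) = te (c :: A2)) ↔
      ((d ++ A1.flatten = A2.flatten) ∧ te (d :: A1) = te A2) := by
  have h := pair_step1 c d hd A2 A1
  constructor
  · rintro ⟨hf, ht⟩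
    have := h.mp ⟨hf.symm, ht.symm⟩
    exact ⟨this.1.symm, this.2.symm⟩
  · rintro ⟨hf, ht⟩
    have := h.mpr ⟨hf.symm, ht.symm⟩
    exact ⟨this.1.symm, this.2.symm⟩

-- the heart of the file: A's outer loop decides "remaining streams equal AND same number of
-- trailing empty words", for any loop state respecting the loop invariant i ≤ len(current word)
theorem outerA_iff (ws1 ws2 : List (List Char)) (idx1 i1 idx2 i2 : Nat)
    (hv1 : ∀ h : idx1 < ws1.length, i1 ≤ (ws1[idx1]'h).length)
    (hv2 : ∀ h : idx2 < ws2.length, i2 ≤ (ws2[idx2]'h).length) :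
    (outerA ws1 ws2 idx1 i1 idx2 i2 = true ↔
      ((rem ws1 idx1 i1).flatten = (rem ws2 idx2 i2).flatten ∧
        te (rem ws1 idx1 i1) = te (rem ws2 idx2 i2))) := by
  revert hv1 hv2
  fun_induction outerA ws1 ws2 idx1 i1 idx2 i2 with
  | case1 idx1 i1 idx2 i2 hw hinner =>
    intro hv1 hv2
    rw [rem_of_lt i1 hw.1, rem_of_lt i2 hw.2]
    simp only [List.flatten_cons]
    refine iff_of_false (by simp) ?_
    rintro ⟨hf, -⟩
    exact innerA_none hinner _ _ hf
  | case2 idx1 i1 idx2 i2 hw j1 j2 hinner h1 h2 ih =>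
    intro hv1 hv2
    obtain ⟨hi1, hi2, hc, hiff⟩ := innerA_some hinner
    have hd1 : (ws1[idx1]'hw.1).drop j1 = [] := List.drop_eq_nil_iff.mpr (by omega)
    have hd2 : (ws2[idx2]'hw.2).drop j2 = [] := List.drop_eq_nil_iff.mpr (by omega)
    have hcc : (ws1[idx1]'hw.1).drop i1 = (ws2[idx2]'hw.2).drop i2 := by
      have := (hiff [] []).mpr (by rw [hd1, hd2])
      simpa using this
    rw [ih (fun _ => Nat.zero_le _) (fun _ => Nat.zero_le _)]
    rw [rem_of_lt i1 hw.1, rem_of_lt i2 hw.2, rem_zero_drop, rem_zero_drop, ← hcc]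
    simp only [List.flatten_cons]
    exact (pair_cons_cons _ _ _).symm
  | case3 idx1 i1 idx2 i2 hw j1 j2 hinner h1 h2 ih =>
    intro hv1 hv2
    rw [not_not] at h2
    obtain ⟨hi1, hi2, hc, hiff⟩ := innerA_some hinner
    have hd1 : (ws1[idx1]'hw.1).drop j1 = [] := List.drop_eq_nil_iff.mpr (by omega)
    have hdne : (ws2[idx2]'hw.2).drop j2 ≠ [] := by
      rw [ne_eq, List.drop_eq_nil_iff]; omega
    have hcc : (ws2[idx2]'hw.2).drop i2 =
        (ws1[idx1]'hw.1).drop i1 ++ (ws2[idx2]'hw.2).drop j2 := by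
      have := (hiff ((ws2[idx2]'hw.2).drop j2) []).mpr (by rw [hd1]; simp)
      simpa using this.symm
    rw [ih (fun _ => Nat.zero_le _) (fun _ => le_of_lt h2)]
    rw [rem_of_lt i1 hw.1, rem_of_lt i2 hw.2, rem_zero_drop, rem_of_lt j2 hw.2, hcc]
    simp only [List.flatten_cons]
    exact (pair_step1 _ _ hdne _ _).symm
  | case4 idx1 i1 idx2 i2 hw j1 j2 hinner h1 h2 ih =>
    intro hv1 hv2
    rw [not_not] at h1
    obtain ⟨hi1, hi2, hc, hiff⟩ := innerA_some hinner
    have hd2 : (ws2[idx2]'hw.2).drop j2 = [] := List.drop_eq_nil_iff.mpr (by omega)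
    have hdne : (ws1[idx1]'hw.1).drop j1 ≠ [] := by
      rw [ne_eq, List.drop_eq_nil_iff]; omega
    have hcc : (ws1[idx1]'hw.1).drop i1 =
        (ws2[idx2]'hw.2).drop i2 ++ (ws1[idx1]'hw.1).drop j1 := by
      have := (hiff [] ((ws1[idx1]'hw.1).drop j1)).mpr (by rw [hd2]; simp)
      simpa using this
    rw [ih (fun _ => le_of_lt h1) (fun _ => Nat.zero_le _)]
    rw [rem_of_lt i1 hw.1, rem_of_lt i2 hw.2, rem_of_lt j1 hw.1, rem_zero_drop, hcc]
    simp only [List.flatten_cons]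
    exact (pair_step2 _ _ hdne _ _).symm
  | case5 idx1 i1 idx2 i2 hw j1 j2 hinner h1 h2 =>
    intro hv1 hv2
    obtain ⟨_, _, hc, _⟩ := innerA_some hinner
    exact (hc ⟨not_not.mp h1, not_not.mp h2⟩).elim
  | case6 idx1 i1 idx2 i2 hw =>
    intro hv1 hv2
    by_cases hx1 : idx1 < ws1.length <;> by_cases hx2 : idx2 < ws2.length
    · exact absurd ⟨hx1, hx2⟩ hw
    · rw [rem_of_lt i1 hx1, rem_of_ge i2 (le_of_not_gt hx2)]
      refine iff_of_false (by simp [hx1]) ?_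
      rintro ⟨hf, ht⟩
      have hlen : te (((ws1[idx1]'hx1).drop i1) :: ws1.drop (idx1 + 1)) =
          (((ws1[idx1]'hx1).drop i1) :: ws1.drop (idx1 + 1)).length :=
        te_eq_length_iff.mpr (by simpa using hf)
      rw [show te ([] : List (List Char)) = 0 from rfl] at ht
      simp only [List.length_cons] at hlen
      omega
    · rw [rem_of_ge i1 (le_of_not_gt hx1), rem_of_lt i2 hx2]
      refine iff_of_false (by simp [hx2]) ?_
      rintro ⟨hf, ht⟩
      have hlen : te (((ws2[idx2]'hx2).drop i2) :: ws2.drop (idx2 + 1)) =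
          (((ws2[idx2]'hx2).drop i2) :: ws2.drop (idx2 + 1)).length :=
        te_eq_length_iff.mpr (by simpa using hf.symm)
      rw [show te ([] : List (List Char)) = 0 from rfl] at ht
      simp only [List.length_cons] at hlen
      omega
    · rw [rem_of_ge i1 (le_of_not_gt hx1), rem_of_ge i2 (le_of_not_gt hx2)]
      simp [hx1, hx2]

-- characterization of A at the top-level state
theorem f_char (word1 word2 : List String) :
    f word1 word2 = true ↔
      ((word1.map String.toList).flatten = (word2.map String.toList).flatten ∧
        te (word1.map String.toList) = te (word2.map String.toList)) := by
  have h := outerA_iff (word1.map String.toList) (word2.map String.toList) 0 0 0 0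
    (fun _ => Nat.zero_le _) (fun _ => Nat.zero_le _)
  rwa [rem_zero, rem_zero] at h

theorem join_empty_eq_flatten (l : List (List Char)) : PySem.Chars.join [] l = l.flatten := by
  induction l with
  | nil => rfl
  | cons a l ih =>
    cases l with
    | nil => simp [PySem.Chars.join, List.intercalate]
    | cons b m =>
      rw [PySem.Chars.join_cons_cons] at *
      simp [ih]

-- characterization of B
theorem f_alt_char (word1 word2 : List String) :
    f_alt word1 word2 = true ↔
      (word1.map String.toList).flatten = (word2.map String.toList).flatten := by
  unfold f_alt
  rw [beq_iff_eq]
  have hnil : "".toList = ([] : List Char) := rfl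
  constructor
  · intro h
    have := congrArg String.toList h
    rwa [PySem.Str.toList_join, PySem.Str.toList_join, hnil, join_empty_eq_flatten,
      join_empty_eq_flatten] at this
  · intro h
    apply String.toList_inj.mp
    rwa [PySem.Str.toList_join, PySem.Str.toList_join, hnil, join_empty_eq_flatten,
      join_empty_eq_flatten]

-- ===== VERDICT (by name: the statement is the Claim_ definition above) =====
theorem f_spec : Claim_unchanged_f := by
  intro word1 word2 _ hD
  have h1 := f_char word1 word2
  have h2 := f_alt_char word1 word2
  unfold D_f at hD
  by_cases hfl : (word1.map String.toList).flatten = (word2.map String.toList).flatten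
  · have hte : te (word1.map String.toList) = te (word2.map String.toList) := by
      by_contra hne
      exact hD ⟨hfl, hne⟩
    rw [h1.mpr ⟨hfl, hte⟩, h2.mpr hfl]
  · rw [Bool.eq_false_iff.mpr (fun h => hfl (h1.mp h).1),
      Bool.eq_false_iff.mpr (fun h => hfl (h2.mp h))]

theorem f_changed : Claim_changed_f := by
  unfold Claim_changed_f
  refine ⟨by decide, by decide, ?_, by decide, by decide⟩
  have h := f_char (pvDiffWitness_f.1) (pvDiffWitness_f.2)
  cases hf : f (pvDiffWitness_f.1) (pvDiffWitness_f.2)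
  · rfl
  · rw [hf] at h
    exact absurd (h.mp rfl) (by decide)

theorem f_tight : Claim_exact_f := by
  intro word1 word2 _ hD
  obtain ⟨hflat, hte⟩ := hD
  have h1 := f_char word1 word2
  have h2 := f_alt_char word1 word2
  have hf : f word1 word2 = false := by
    cases hf : f word1 word2
    · rfl
    · rw [hf] at h1; exact absurd (h1.mp rfl).2 hte
  have hg : f_alt word1 word2 = true := h2.mpr hflat
  simp [hf, hg]
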